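-- pv_equiv track=rewrite | github.com/eliottcassidy2000/math | 04-computation/full_class_structure.py | full_tournament
-- ===== SOURCE A (Python) =====
-- def full_tournament(n):
--     """Build the full tiling tournament."""
--     # Path edges: i -> i+1
--     # Non-adjacent: j -> i for j - i >= 2
--     A = [[0]*n for _ in range(n)]
--     for i in range(n-1):
--         A[i][i+1] = 1  # path edge
--     for i in range(n):
--         for j in range(i+2, n):
--             A[j][i] = 1  # backward non-adjacent
--     return A
-- ===== SOURCE B (Python) =====
-- def full_tournament(n):
--     """Build the full tiling tournament."""
--     # Row i is built from segments: max(i-1,0) ones (backward edges to 0..i-2),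
--     # then zeros on columns i-1 and i (self and predecessor; only column 0 when i==0),
--     # then a 1 (path edge to i+1), padded with zeros and truncated to width n.
--     return [([1] * max(i - 1, 0) + [0] * min(i + 1, 2) + [1] + [0] * n)[:n]
--             for i in range(n)]
-- ===== Notes on version B (the rewrite author's own statement) =====
-- stated objective: alternative
-- what changed: Instead of zero-initializing an n-by-n matrix and overwriting selected entries with two sparse fill loops, B constructs each row directly by concatenating run-length segments (a block of ones, a block of zeros, the path-edge one, zero padding) and truncating to width n.
import Mathlib
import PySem

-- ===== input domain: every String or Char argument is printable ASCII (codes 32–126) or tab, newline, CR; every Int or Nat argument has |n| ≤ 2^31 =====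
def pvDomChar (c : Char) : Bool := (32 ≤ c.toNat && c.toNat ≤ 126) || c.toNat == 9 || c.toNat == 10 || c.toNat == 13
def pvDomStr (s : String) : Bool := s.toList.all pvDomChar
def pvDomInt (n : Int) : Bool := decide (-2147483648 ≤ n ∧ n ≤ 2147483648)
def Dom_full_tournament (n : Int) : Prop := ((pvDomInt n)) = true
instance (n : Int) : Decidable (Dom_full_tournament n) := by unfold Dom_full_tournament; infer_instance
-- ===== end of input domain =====

-- B builds each row by concatenating run-length segments and truncating, instead of A's zero-init plus two sparse fill loops (objective: alternative).

-- ===== PORT A =====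
-- A[r][c] = 1 performed on the nested list (indices are nonnegative and in range in A's loops)
def pvSetCell (m : List (List Int)) (i j : Int) : List (List Int) :=
  PySem.List.pySetD m i (PySem.List.pySetD (PySem.List.pyGetD m i []) j 1)

def full_tournament (n : Int) : List (List Int) :=
  -- A = [[0]*n for _ in range(n)]
  let A0 := (PySem.List.pyRange 0 n).map (fun _ => List.replicate n.toNat (0 : Int))
  -- for i in range(n-1): A[i][i+1] = 1
  let A1 := (PySem.List.pyRange 0 (n - 1)).foldl (fun m i => pvSetCell m i (i + 1)) A0
  -- for i in range(n): for j in range(i+2, n): A[j][i] = 1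
  (PySem.List.pyRange 0 n).foldl
    (fun m i => (PySem.List.pyRange (i + 2) n).foldl (fun m j => pvSetCell m j i) m) A1

-- ===== PORT B =====
def full_tournament_alt (n : Int) : List (List Int) :=
  -- [([1]*max(i-1,0) + [0]*min(i+1,2) + [1] + [0]*n)[:n] for i in range(n)]
  (PySem.List.pyRange 0 n).map (fun i =>
    PySem.List.slice
      (List.replicate (max (i - 1) 0).toNat (1 : Int) ++
       List.replicate (min (i + 1) 2).toNat (0 : Int) ++
       [1] ++ List.replicate n.toNat (0 : Int))
      none (some n))

-- ===== PRECONDITION & SPEC =====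
def Spec_full_tournament (n : Int) (out : List (List Int)) : Prop := out = full_tournament_alt n
instance (n : Int) (out : List (List Int)) : Decidable (Spec_full_tournament n out) := by unfold Spec_full_tournament; infer_instance

-- ===== CLAIM (what is proved, stated in full; the proofs are below) =====
def Claim_equal_full_tournament : Prop := ∀ (n : Int), Dom_full_tournament n → Spec_full_tournament n (full_tournament n)

-- ===== LEMMAS AND PROOFS =====

-- Nat-index form of pvSetCell
def natSetCell (m : List (List Int)) (r c : Nat) : List (List Int) :=
  m.set r ((m.getD r []).set c 1)

-- applying a list of (row, col) writes of the value 1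
def applyCells (l : List (Nat × Nat)) (m : List (List Int)) : List (List Int) :=
  l.foldl (fun m p => natSetCell m p.1 p.2) m

-- the (r, c) entry of a matrix
def entryOf (m : List (List Int)) (r c : Nat) : Int := (m.getD r []).getD c 0

-- the zero matrix A starts from
def zeroMat (N : Nat) : List (List Int) := (List.range N).map (fun _ => List.replicate N (0 : Int))

lemma pvSetCell_cast (m : List (List Int)) (r c : Nat) :
    pvSetCell m (r : Int) (c : Int) = natSetCell m r c := by
  simp [pvSetCell, natSetCell, PySem.List.pySetD_natCast, PySem.List.pyGetD_natCast]

lemma getD_set_eq_ite {α : Type} (l : List α) (i j : Nat) (a d : α) :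
    (l.set i a).getD j d = if i = j ∧ i < l.length then a else l.getD j d := by
  by_cases hi : i = j
  · subst hi
    by_cases hl : i < l.length
    · simp [List.getD_eq_getElem?_getD, hl]
    · have h1 : l.set i a = l := List.set_eq_of_length_le (by omega)
      simp [h1, hl]
  · simp [List.getD_eq_getElem?_getD, hi]

lemma length_natSetCell (m : List (List Int)) (r c : Nat) :
    (natSetCell m r c).length = m.length := by
  simp [natSetCell]

lemma rowlen_natSetCell (m : List (List Int)) (r c r' : Nat) :
    ((natSetCell m r c).getD r' []).length = (m.getD r' []).length := by
  unfold natSetCell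
  rw [getD_set_eq_ite]
  split_ifs with h
  · rw [← h.1]; simp
  · rfl

lemma entry_natSetCell (m : List (List Int)) (r c r' c' : Nat) :
    entryOf (natSetCell m r c) r' c' =
      if r' = r ∧ r < m.length ∧ c' = c ∧ c < (m.getD r []).length then 1
      else entryOf m r' c' := by
  unfold entryOf natSetCell
  rw [getD_set_eq_ite]
  split_ifs with h1 h2 h3
  · rw [getD_set_eq_ite, if_pos ⟨h2.2.2.1.symm, h2.2.2.2⟩]
  · rw [getD_set_eq_ite, if_neg (fun hc => h2 ⟨h1.1.symm, h1.2, hc.1.symm, hc.2⟩), h1.1]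
  · exact absurd ⟨h3.1.symm, h3.2.1⟩ h1
  · rfl

lemma length_applyCells (l : List (Nat × Nat)) (m : List (List Int)) :
    (applyCells l m).length = m.length := by
  induction l generalizing m with
  | nil => rfl
  | cons p l ih => rw [applyCells, List.foldl_cons, ← applyCells, ih, length_natSetCell]

lemma rowlen_applyCells (l : List (Nat × Nat)) (m : List (List Int)) (r : Nat) :
    ((applyCells l m).getD r []).length = (m.getD r []).length := by
  induction l generalizing m with
  | nil => rfl
  | cons p l ih => rw [applyCells, List.foldl_cons, ← applyCells, ih, rowlen_natSetCell]

lemma entry_applyCells (l : List (Nat × Nat)) (m : List (List Int)) (r c : Nat)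
    (h : ∀ p ∈ l, p.1 < m.length ∧ p.2 < (m.getD p.1 []).length) :
    entryOf (applyCells l m) r c = if (r, c) ∈ l then 1 else entryOf m r c := by
  induction l generalizing m with
  | nil => rfl
  | cons p l ih =>
    rw [applyCells, List.foldl_cons, ← applyCells]
    rw [ih _ (fun q hq => by
      rw [length_natSetCell, rowlen_natSetCell]
      exact h q (List.mem_cons_of_mem _ hq))]
    rw [entry_natSetCell]
    obtain ⟨hp1, hp2⟩ := h p (List.mem_cons_self ..)
    by_cases hmem : (r, c) ∈ l
    · rw [if_pos hmem, if_pos (List.mem_cons_of_mem _ hmem)]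
    · rw [if_neg hmem]
      by_cases he : (r, c) = p
      · rw [if_pos ⟨(Prod.ext_iff.mp he).1, hp1, (Prod.ext_iff.mp he).2, hp2⟩,
          if_pos (List.mem_cons.mpr (Or.inl he))]
      · rw [if_neg (fun hc => he (Prod.ext_iff.mpr ⟨hc.1, hc.2.2.1⟩)),
          if_neg (fun hc => (List.mem_cons.mp hc).elim he hmem)]

-- pyRange with step 1, lower bound 0, as a Nat range (total in n)
lemma pyRange_zero_toNat (n : Int) :
    PySem.List.pyRange 0 n = (List.range n.toNat).map (fun k : Nat => (k : Int)) := by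
  rw [PySem.List.pyRange_of_pos 0 n one_pos]
  have h : (if (0:Int) < n then ((n - 0 + 1 - 1) / 1).toNat else 0) = n.toNat := by
    split_ifs with h <;> omega
  rw [h]
  exact List.map_congr_left (fun k _ => by ring)

lemma pyRange_zero_sub_one (n : Int) :
    PySem.List.pyRange 0 (n - 1) = (List.range (n.toNat - 1)).map (fun k : Nat => (k : Int)) := by
  rw [PySem.List.pyRange_of_pos 0 (n - 1) one_pos]
  have h : (if (0:Int) < n - 1 then ((n - 1 - 0 + 1 - 1) / 1).toNat else 0) = n.toNat - 1 := by
    split_ifs with h <;> omega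
  rw [h]
  exact List.map_congr_left (fun k _ => by ring)

lemma pyRange_add_two (i : Nat) (n : Int) :
    PySem.List.pyRange ((i : Int) + 2) n =
      (List.range (n.toNat - (i + 2))).map (fun t : Nat => ((i + 2 + t : Nat) : Int)) := by
  rw [PySem.List.pyRange_of_pos ((i : Int) + 2) n one_pos]
  have h : (if (i : Int) + 2 < n then ((n - ((i : Int) + 2) + 1 - 1) / 1).toNat else 0)
      = n.toNat - (i + 2) := by
    split_ifs with h <;> omega
  rw [h]
  exact List.map_congr_left (fun t _ => by push_cast; ring)

-- the write lists of A's two fill loops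
def pathCells (N : Nat) : List (Nat × Nat) := (List.range (N - 1)).map (fun k => (k, k + 1))

def backCells (N : Nat) : List (Nat × Nat) :=
  (List.range N).flatMap (fun i => (List.range (N - (i + 2))).map (fun t => (i + 2 + t, i)))

lemma mem_pathCells (N r c : Nat) : (r, c) ∈ pathCells N ↔ r < N - 1 ∧ c = r + 1 := by
  simp only [pathCells, List.mem_map, List.mem_range, Prod.mk.injEq]
  constructor
  · rintro ⟨k, hk, rfl, rfl⟩; omega
  · rintro ⟨h1, rfl⟩; exact ⟨r, h1, rfl, rfl⟩

lemma mem_backCells (N r c : Nat) : (r, c) ∈ backCells N ↔ c + 2 ≤ r ∧ r < N := by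
  simp only [backCells, List.mem_flatMap, List.mem_map, List.mem_range, Prod.mk.injEq]
  constructor
  · rintro ⟨i, hi, t, ht, rfl, rfl⟩; omega
  · rintro ⟨h1, h2⟩
    exact ⟨c, by omega, r - (c + 2), by omega, by omega, rfl⟩

lemma cells_in_range (N : Nat) (l : List (Nat × Nat))
    (hl : ∀ p ∈ l, p.1 < N ∧ p.2 < N)
    (m : List (List Int)) (hm : m.length = N)
    (hrow : ∀ r, r < N → (m.getD r []).length = N) :
    ∀ p ∈ l, p.1 < m.length ∧ p.2 < (m.getD p.1 []).length := by
  intro p hp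
  obtain ⟨h1, h2⟩ := hl p hp
  exact ⟨hm ▸ h1, (hrow p.1 h1) ▸ h2⟩

lemma zeroMat_getD (N r : Nat) (h : r < N) :
    (zeroMat N).getD r [] = List.replicate N 0 := by
  rw [List.getD_eq_getElem _ [] (by simpa [zeroMat] using h)]
  simp [zeroMat]

lemma zeroMat_length (N : Nat) : (zeroMat N).length = N := by simp [zeroMat]

lemma zeroMat_rowlen (N : Nat) : ∀ r, r < N → ((zeroMat N).getD r []).length = N := by
  intro r h
  rw [zeroMat_getD N r h, List.length_replicate]

-- A's port as a sequence of 1-writes on the zero matrix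
lemma full_tournament_eq_applyCells (n : Int) :
    full_tournament n = applyCells (backCells n.toNat) (applyCells (pathCells n.toNat) (zeroMat n.toNat)) := by
  unfold full_tournament
  rw [pyRange_zero_toNat, pyRange_zero_sub_one, List.map_map]
  rw [List.foldl_map, List.foldl_map]
  have h1 : ∀ (m : List (List Int)) (k : Nat),
      pvSetCell m (k : Int) ((k : Int) + 1) = natSetCell m k (k + 1) := by
    intro m k
    rw [show ((k : Int) + 1) = ((k + 1 : Nat) : Int) by push_cast; ring, pvSetCell_cast]
  simp only [h1]
  have h2 : ∀ (m : List (List Int)) (i : Nat),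
      (PySem.List.pyRange ((i : Int) + 2) n).foldl (fun m j => pvSetCell m j (i : Int)) m
        = applyCells ((List.range (n.toNat - (i + 2))).map (fun t => (i + 2 + t, i))) m := by
    intro m i
    rw [pyRange_add_two, List.foldl_map, applyCells, List.foldl_map]
    simp only [pvSetCell_cast]
  simp only [h2]
  rw [applyCells, backCells, List.foldl_flatMap, pathCells, applyCells, List.foldl_map]
  rfl

lemma entry_full_tournament (n : Int) (r c : Nat) (hr : r < n.toNat) (hc : c < n.toNat) :
    entryOf (full_tournament n) r c =
      if c + 2 ≤ r ∨ (r < n.toNat - 1 ∧ c = r + 1) then 1 else 0 := by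
  rw [full_tournament_eq_applyCells]
  have hM1len : (applyCells (pathCells n.toNat) (zeroMat n.toNat)).length = n.toNat := by
    rw [length_applyCells, zeroMat_length]
  have hM1row : ∀ r', r' < n.toNat →
      ((applyCells (pathCells n.toNat) (zeroMat n.toNat)).getD r' []).length = n.toNat := by
    intro r' h; rw [rowlen_applyCells]; exact zeroMat_rowlen n.toNat r' h
  rw [entry_applyCells _ _ _ _ (cells_in_range n.toNat _ (by
        intro p hp
        obtain ⟨h1, h2⟩ := (mem_backCells n.toNat p.1 p.2).mp hp
        omega) _ hM1len hM1row)]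
  rw [entry_applyCells _ _ _ _ (cells_in_range n.toNat _ (by
        intro p hp
        obtain ⟨h1, h2⟩ := (mem_pathCells n.toNat p.1 p.2).mp hp
        omega) _ (zeroMat_length n.toNat) (zeroMat_rowlen n.toNat))]
  have he0 : entryOf (zeroMat n.toNat) r c = 0 := by
    unfold entryOf
    rw [zeroMat_getD n.toNat r hr, List.getD_replicate _ hc]
  rw [he0]
  simp only [mem_backCells, mem_pathCells]
  split_ifs <;> omega

-- B's row r, written with Nat segment lengths (for r < n.toNat)
def rowB (N r : Nat) : List Int :=
  (List.replicate (r - 1) (1 : Int) ++ List.replicate (min (r + 1) 2) (0 : Int) ++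
    [1] ++ List.replicate N (0 : Int)).take N

lemma full_tournament_alt_eq_rowB (n : Int) :
    full_tournament_alt n = (List.range n.toNat).map (fun r => rowB n.toNat r) := by
  unfold full_tournament_alt
  rw [pyRange_zero_toNat, List.map_map]
  apply List.map_congr_left
  intro r hr
  have hrn : r < n.toNat := List.mem_range.mp hr
  have hn : 0 ≤ n := by omega
  simp only [Function.comp_apply]
  rw [PySem.List.slice_to _ hn]
  unfold rowB
  have h1 : (max ((r:Int) - 1) 0).toNat = r - 1 := by omega
  have h2 : (min ((r:Int) + 1) 2).toNat = min (r + 1) 2 := by omega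
  rw [h1, h2]

lemma rowB_length (N r : Nat) : (rowB N r).length = N := by
  unfold rowB
  rw [List.length_take]
  simp only [List.length_append, List.length_replicate, List.length_cons, List.length_nil]
  omega

lemma rowB_getElem (N r c : Nat) (_hr : r < N) (hc : c < (rowB N r).length) :
    (rowB N r)[c] = if c + 2 ≤ r ∨ (r < N - 1 ∧ c = r + 1) then 1 else 0 := by
  have hcN : c < N := by rw [rowB_length] at hc; exact hc
  unfold rowB
  simp only [List.getElem_take, List.append_assoc]
  have hz : min (r + 1) 2 = if r = 0 then 1 else 2 := by split_ifs <;> omega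
  by_cases h1 : c < r - 1
  · rw [List.getElem_append_left (by simp only [List.length_replicate]; omega), List.getElem_replicate,
      if_pos (Or.inl (by omega))]
  · rw [List.getElem_append_right (by simp only [List.length_replicate]; omega)]
    simp only [List.length_replicate]
    by_cases h2 : c - (r - 1) < min (r + 1) 2
    · rw [List.getElem_append_left (by simp only [List.length_replicate]; omega), List.getElem_replicate,
        if_neg (by omega)]
    · rw [List.getElem_append_right (by simp only [List.length_replicate]; omega)]
      simp only [List.length_replicate]
      simp only [List.singleton_append, List.getElem_cons]
      by_cases h3 : c - (r - 1) - min (r + 1) 2 = 0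
      · have hcr : c = r + 1 := by omega
        rw [dif_pos h3, if_pos (Or.inr ⟨by omega, hcr⟩)]
      · rw [dif_neg h3, List.getElem_replicate, if_neg (by omega)]

-- ===== VERDICT (by name: the statement is the Claim_ definition above) =====
theorem full_tournament_spec : Claim_equal_full_tournament := by
  intro n _
  unfold Spec_full_tournament
  rw [full_tournament_alt_eq_rowB]
  have hlen : (full_tournament n).length = n.toNat := by
    rw [full_tournament_eq_applyCells, length_applyCells, length_applyCells, zeroMat_length]
  have hrow : ∀ r, r < n.toNat → ((full_tournament n).getD r []).length = n.toNat := by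
    intro r h
    rw [full_tournament_eq_applyCells, rowlen_applyCells, rowlen_applyCells]
    exact zeroMat_rowlen n.toNat r h
  apply List.ext_getElem
  · rw [hlen]; simp
  · intro r h1 h2
    have hrN : r < n.toNat := hlen ▸ h1
    rw [List.getElem_map, List.getElem_range]
    apply List.ext_getElem
    · rw [← List.getD_eq_getElem _ [] h1, hrow r hrN, rowB_length]
    · intro c hc1 hc2
      have hcN : c < n.toNat := by
        rw [← List.getD_eq_getElem _ [] h1, hrow r hrN] at hc1; exact hc1
      rw [rowB_getElem n.toNat r c hrN hc2]
      have hE : entryOf (full_tournament n) r c = (full_tournament n)[r][c] := by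
        unfold entryOf
        rw [List.getD_eq_getElem _ [] h1, List.getD_eq_getElem _ 0 hc1]
      rw [← hE, entry_full_tournament n r c hrN hcN]
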